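-- pv_equiv track=rewrite | github.com/981377660LMT/algorithm-study | tmp/20220423LCP/3.py | getMaximumNumber
-- ===== SOURCE A (Python) =====
-- from collections import defaultdict
-- from functools import lru_cache
-- from typing import List
--
-- POS = [(0, 0), (0, 1), (0, 2), (1, 0), (1, 1), (1, 2), (2, 0), (2, 1), (2, 2)]
--
-- def getMaximumNumber(moles: List[List[int]]) -> int:
--     @lru_cache(None)
--     def dfs(index: int, row: int, col: int) -> int:
--         if index >= n:
--             return 0
--
--         curTime = times[index]
--         nextTime = times[index + 1] if index < n - 1 else curTime
--         diff = nextTime - curTime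
--
--         cur = int((row, col) in record[curTime])
--         nextMax = 0
--         for nr, nc in POS:
--             if abs(row - nr) + abs(col - nc) <= diff:
--                 nextMax = max(nextMax, dfs(index + 1, nr, nc))
--         return cur + nextMax
--
--     s = set([0])  # 注意0时刻也要加入
--     record = defaultdict(set)
--     for t, x, y in moles:
--         s.add(t)
--         record[t].add((x, y))
--
--     times = sorted(s)
--
--     n = len(times)
--     res = dfs(0, 1, 1)
--     dfs.cache_clear()
--     return res
-- ===== SOURCE B (Python) =====
-- from typing import List
--
-- POS = [(0, 0), (0, 1), (0, 2), (1, 0), (1, 1), (1, 2), (2, 0), (2, 1), (2, 2)]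
--
-- def getMaximumNumber(moles: List[List[int]]) -> int:
--     s = {0}
--     record = {}
--     for t, x, y in moles:
--         s.add(t)
--         record.setdefault(t, set()).add((x, y))
--     times = sorted(s)
--     # bottom-up tabulation over times, from the last time back to the first
--     dp = {pos: 0 for pos in POS}
--     prev_time = None
--     for t in reversed(times):
--         diff = 0 if prev_time is None else prev_time - t
--         cell = record.get(t, set())
--         dp = {(r, c): (1 if (r, c) in cell else 0)
--                       + max((dp[(nr, nc)] for (nr, nc) in POS
--                              if abs(r - nr) + abs(c - nc) <= diff), default=0)
--               for (r, c) in POS}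
--         prev_time = t
--     return dp[(1, 1)]
-- ===== Notes on version B (the rewrite author's own statement) =====
-- stated objective: alternative
-- what changed: Replaces the lru_cache-memoized top-down recursion dfs over time indices by an explicit bottom-up tabulation: a 9-cell dp dict updated while walking the sorted times back-to-front, returning the dp entry of the start cell.
import Mathlib
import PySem

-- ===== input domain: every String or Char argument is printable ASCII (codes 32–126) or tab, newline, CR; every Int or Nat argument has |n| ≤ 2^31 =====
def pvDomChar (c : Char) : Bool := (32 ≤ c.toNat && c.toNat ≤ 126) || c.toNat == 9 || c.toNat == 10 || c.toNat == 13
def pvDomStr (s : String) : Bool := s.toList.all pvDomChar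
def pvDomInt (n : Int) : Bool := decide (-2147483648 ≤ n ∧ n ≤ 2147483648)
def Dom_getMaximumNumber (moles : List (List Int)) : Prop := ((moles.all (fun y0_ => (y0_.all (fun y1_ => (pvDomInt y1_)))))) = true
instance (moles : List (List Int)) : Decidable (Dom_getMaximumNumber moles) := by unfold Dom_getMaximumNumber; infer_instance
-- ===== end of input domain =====

-- ===== PORT A =====
-- B replaces A's memoized top-down recursion over time indices by a bottom-up
-- tabulation over the sorted times (a dict of the 9 cells updated back-to-front).
-- Return-value equivalence only; neither program mutates its argument.

-- the POS constant of the module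
def POSL : List (Int × Int) := [(0,0),(0,1),(0,2),(1,0),(1,1),(1,2),(2,0),(2,1),(2,2)]

-- A: s = set([0]); record = defaultdict(set); for t, x, y in moles: s.add(t); record[t].add((x, y))
def buildA (moles : List (List Int)) : PySem.Set Int × PySem.Dict Int (PySem.Set (Int × Int)) :=
  moles.foldl (fun st row =>
    match row with
    | [t, x, y] => (PySem.Set.add st.1 t,
        st.2.insert t (PySem.Set.add (st.2.getD t PySem.Set.empty) (x, y)))
    | _ => st)  -- unreachable under Pre_ (every row has length 3)
    (PySem.Set.ofList [0], PySem.Dict.empty)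

-- A's dfs(index, row, col); fuel bounds the recursion depth (n - index steps suffice)
def dfsA (times : List Int) (record : PySem.Dict Int (PySem.Set (Int × Int))) :
    Nat → Nat → Int → Int → Int
  | 0, _, _, _ => 0
  | fuel+1, index, row, col =>
    if times.length ≤ index then 0
    else
      let curTime := (PySem.List.pyGet? times (index : Int)).getD 0
      let nextTime := if index < times.length - 1 then
          (PySem.List.pyGet? times ((index : Int) + 1)).getD 0 else curTime
      let diff := nextTime - curTime
      let cur : Int := if PySem.Set.contains (record.getD curTime PySem.Set.empty) (row, col) then 1 else 0
      let nextMax := POSL.foldl (fun acc p =>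
        if |row - p.1| + |col - p.2| ≤ diff then
          max acc (dfsA times record fuel (index + 1) p.1 p.2)
        else acc) 0
      cur + nextMax

def getMaximumNumber (moles : List (List Int)) : Int :=
  let sr := buildA moles
  let times := PySem.List.sorted sr.1 (fun x => x) false
  dfsA times sr.2 times.length 0 1 1

-- ===== PORT B =====
-- B: s = {0}; record = {}; for t, x, y in moles: s.add(t); record.setdefault(t, set()).add((x, y))
def buildB (moles : List (List Int)) : PySem.Set Int × PySem.Dict Int (PySem.Set (Int × Int)) :=
  moles.foldl (fun st row =>
    match row with
    | [t, x, y] => (PySem.Set.add st.1 t,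
        st.2.insert t (PySem.Set.add (st.2.getD t PySem.Set.empty) (x, y)))
    | _ => st)  -- unreachable under Pre_ (every row has length 3)
    (PySem.Set.ofList [0], PySem.Dict.empty)

-- one iteration of B's 'for t in reversed(times)' loop; state = (dp, prev_time)
def stepB (record : PySem.Dict Int (PySem.Set (Int × Int)))
    (st : PySem.Dict (Int × Int) Int × Option Int) (t : Int) :
    PySem.Dict (Int × Int) Int × Option Int :=
  let diff : Int := match st.2 with | none => 0 | some pt => pt - t
  let cell := record.getD t PySem.Set.empty
  let ndp := POSL.foldl (fun d p =>
      d.insert p ((if PySem.Set.contains cell p then (1 : Int) else 0)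
        + ((PySem.List.max?
              ((POSL.filter (fun q => decide (|p.1 - q.1| + |p.2 - q.2| ≤ diff))).map
                (fun q => st.1.getD q 0)) (fun v => v)).getD 0)))
    PySem.Dict.empty
  (ndp, some t)

def getMaximumNumber_alt (moles : List (List Int)) : Int :=
  let sr := buildB moles
  let times := PySem.List.sorted sr.1 (fun x => x) false
  let dp0 := POSL.foldl (fun d p => d.insert p (0 : Int)) PySem.Dict.empty
  let st := (times.reverse).foldl (stepB sr.2) (dp0, none)
  st.1.getD (1, 1) 0

-- ===== PRECONDITION & SPEC =====
-- Pre_ excludes exactly the inputs where Python A raises: a row that is not a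
-- [t, x, y] triple makes 'for t, x, y in moles' raise ValueError/TypeError.
def Pre_getMaximumNumber (moles : List (List Int)) : Prop := ∀ row ∈ moles, row.length = 3
instance (moles : List (List Int)) : Decidable (Pre_getMaximumNumber moles) := by
  unfold Pre_getMaximumNumber; infer_instance

def pvWitness_getMaximumNumber : List (List Int) := [[1, 0, 0], [2, 2, 2], [1, 1, 1]]

def Spec_getMaximumNumber (moles : List (List Int)) (out : Int) : Prop := out = getMaximumNumber_alt moles
instance (moles : List (List Int)) (out : Int) : Decidable (Spec_getMaximumNumber moles out) := by unfold Spec_getMaximumNumber; infer_instance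

-- ===== CLAIM (what is proved, stated in full; the proofs are below) =====
def Claim_equal_getMaximumNumber : Prop := ∀ (moles : List (List Int)), Dom_getMaximumNumber moles → Pre_getMaximumNumber moles → Spec_getMaximumNumber moles (getMaximumNumber moles)

-- ===== LEMMAS AND PROOFS =====

-- dp0.getD / ndp.getD: a fold of inserts keyed by the list element itself
lemma getD_foldl_insert_fun {kappa nu : Type} [BEq kappa] [LawfulBEq kappa] [DecidableEq kappa]
    (l : List kappa) (f : kappa → nu) (d : PySem.Dict kappa nu) (q : kappa) (d0 : nu) :
    (l.foldl (fun d p => d.insert p (f p)) d).getD q d0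
      = if q ∈ l then f q else d.getD q d0 := by
  induction l generalizing d with
  | nil => simp
  | cons x xs ih =>
    simp only [List.foldl_cons, ih, PySem.Dict.getD_insert, List.mem_cons]
    by_cases hx : q = x <;> by_cases hm : q ∈ xs <;> simp [hx, hm]

-- times[j] through PySem indexing
lemma pyGetD_idx (l : List Int) (j : Nat) (h : j < l.length) :
    (PySem.List.pyGet? l (j : Int)).getD 0 = l[j] := by
  simp [PySem.List.pyGet?, PySem.List.pyIdx?, h]

-- A's dfs is nonnegative
lemma dfsA_nonneg (times : List Int) (record : PySem.Dict Int (PySem.Set (Int × Int))) :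
    ∀ fuel index row col, 0 ≤ dfsA times record fuel index row col := by
  intro fuel
  induction fuel with
  | zero => intro _ _ _; simp [dfsA]
  | succ fuel ih =>
    intro index row col
    rw [dfsA]
    split
    · exact le_refl 0
    · dsimp only
      have hmax : ∀ (l : List (Int × Int)) (acc : Int) (diff : Int), acc ≤
          l.foldl (fun acc p =>
            if |row - p.1| + |col - p.2| ≤ diff then
              max acc (dfsA times record fuel (index + 1) p.1 p.2)
            else acc) acc := by
        intro l
        induction l with
        | nil => intro acc diff; exact le_refl acc
        | cons y ys ihy =>
          intro acc diff
          refine le_trans ?_ (ihy _ diff)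
          dsimp only
          split
          · exact le_max_left _ _
          · exact le_refl acc
      have h1 : (0:Int) ≤ (if PySem.Set.contains (record.getD ((PySem.List.pyGet? times (index : Int)).getD 0) PySem.Set.empty) (row, col) then (1:Int) else 0) := by
        split <;> omega
      have h2 := hmax POSL 0
        ((if index < times.length - 1 then (PySem.List.pyGet? times ((index : Int) + 1)).getD 0
          else (PySem.List.pyGet? times (index : Int)).getD 0)
         - (PySem.List.pyGet? times (index : Int)).getD 0)
      omega

-- the running max of A's filtered fold equals B's max?-with-default over the same values
lemma foldl_max_eq_max?_getD (l : List Int) (h : ∀ x ∈ l, 0 ≤ x) :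
    l.foldl max 0 = (PySem.List.max? l (fun v => v)).getD 0 := by
  cases l with
  | nil => simp [PySem.List.max?]
  | cons x t =>
    rw [PySem.List.max?_id_cons, Option.getD_some, List.foldl_cons,
      max_eq_right (h x (List.mem_cons_self))]

-- MAIN INVARIANT: folding B's step over the reversed suffix times[i:] tabulates A's dfs at index i
lemma dp_invariant (times : List Int) (record : PySem.Dict Int (PySem.Set (Int × Int))) :
    ∀ (k i : Nat), i + k = times.length →
      (((times.drop i).reverse).foldl (stepB record)
          (POSL.foldl (fun d p => d.insert p (0 : Int)) PySem.Dict.empty, none)).2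
        = times[i]? ∧
      ∀ p ∈ POSL,
        (((times.drop i).reverse).foldl (stepB record)
            (POSL.foldl (fun d p => d.insert p (0 : Int)) PySem.Dict.empty, none)).1.getD p 0
          = dfsA times record k i p.1 p.2 := by
  intro k
  induction k with
  | zero =>
    intro i hi
    have hdrop : times.drop i = [] := List.drop_eq_nil_of_le (by omega)
    rw [hdrop]
    refine ⟨by simp [List.getElem?_eq_none (by omega : times.length ≤ i)], ?_⟩
    intro p hp
    simp only [List.reverse_nil, List.foldl_nil, dfsA]
    rw [getD_foldl_insert_fun]
    simp [hp]
  | succ k ih =>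
    intro i hi
    have hilt : i < times.length := by omega
    have hdrop : times.drop i = times[i] :: times.drop (i + 1) :=
      List.drop_eq_getElem_cons hilt
    obtain ⟨ih2, ih1⟩ := ih (i + 1) (by omega)
    rw [hdrop, List.reverse_cons, List.foldl_append, List.foldl_cons, List.foldl_nil]
    set st' := (((times.drop (i+1)).reverse).foldl (stepB record)
        (POSL.foldl (fun d p => d.insert p (0 : Int)) PySem.Dict.empty, none)) with hst'
    -- the diff computed by B equals the diff computed by A
    have hcur : (PySem.List.pyGet? times (i : Int)).getD 0 = times[i] := pyGetD_idx times i hilt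
    have hdiff : (match st'.2 with | none => (0:Int) | some pt => pt - times[i])
        = (if i < times.length - 1 then (PySem.List.pyGet? times ((i : Int) + 1)).getD 0
           else times[i]) - times[i] := by
      rw [ih2]
      by_cases hlast : i + 1 < times.length
      · have h2 : i < times.length - 1 := by omega
        have hc : ((i : Int) + 1) = ((i + 1 : Nat) : Int) := by push_cast; ring
        rw [List.getElem?_eq_getElem hlast, if_pos h2, hc, pyGetD_idx times (i+1) hlast]
      · have h1 : times[i+1]? = none := List.getElem?_eq_none (by omega)
        have h2 : ¬ i < times.length - 1 := by omega
        simp [h1, h2]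
    constructor
    · simp only [stepB, List.getElem?_eq_getElem hilt]
    · intro p hp
      -- unfold one step of B and one step of A
      rw [dfsA]
      simp only [stepB]
      rw [getD_foldl_insert_fun]
      simp only [hp, if_pos]
      have hnotdone : ¬ times.length ≤ i := by omega
      rw [if_neg hnotdone, hcur, hdiff]
      -- A's running-max fold over POSL as a fold over the filtered list
      rw [PySem.List.foldl_ite_eq_foldl_filter
        (p := fun q : Int × Int => |p.1 - q.1| + |p.2 - q.2| ≤
          ((if i < times.length - 1 then (PySem.List.pyGet? times ((i : Int) + 1)).getD 0
            else times[i]) - times[i]))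
        (f := fun acc q => max acc (dfsA times record k (i + 1) q.1 q.2))]
      -- the tabulated values agree with dfs at index i+1
      have hmapeq :
          (POSL.filter (fun q => decide (|p.1 - q.1| + |p.2 - q.2| ≤
              ((if i < times.length - 1 then (PySem.List.pyGet? times ((i : Int) + 1)).getD 0
                else times[i]) - times[i])))).map
            (fun q => st'.1.getD q 0)
          = (POSL.filter (fun q => decide (|p.1 - q.1| + |p.2 - q.2| ≤
              ((if i < times.length - 1 then (PySem.List.pyGet? times ((i : Int) + 1)).getD 0
                else times[i]) - times[i])))).map
            (fun q => dfsA times record k (i + 1) q.1 q.2) := by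
        apply List.map_congr_left
        intro q hq
        exact ih1 q (List.mem_of_mem_filter hq)
      rw [hmapeq,
        ← foldl_max_eq_max?_getD _ (by
          intro x hx
          obtain ⟨q, _, rfl⟩ := List.mem_map.mp hx
          exact dfsA_nonneg times record k (i+1) q.1 q.2),
        List.foldl_map]

-- the two builds are the same computation
lemma build_eq (moles : List (List Int)) : buildA moles = buildB moles := rfl

-- ===== VERDICT (by name: the statement is the Claim_ definition above) =====
theorem getMaximumNumber_spec : Claim_equal_getMaximumNumber := by
  intro moles _ _
  unfold Spec_getMaximumNumber getMaximumNumber getMaximumNumber_alt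
  rw [← build_eq]
  set sr := buildA moles
  set times := PySem.List.sorted sr.1 (fun x => x) false with htimes
  have hdrop0 : times.drop 0 = times := List.drop_zero
  obtain ⟨_, h⟩ := dp_invariant times sr.2 times.length 0 (by omega)
  rw [hdrop0] at h
  exact (h (1, 1) (by simp [POSL])).symm
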